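-- pv_equiv track=rewrite | github.com/armanddd/map_generator-parser | map_drawer.py | stock_final_output
-- ===== SOURCE A (Python) =====
-- def stock_final_output(final_output, starting_x, starting_y):
--     final_res = [] * len(final_output)
--     counter = 1
--     final_res.append((starting_x, starting_y))
--     for c in final_output:
--         if c == 'R':
--             starting_x += 1
--         if c == 'L':
--             starting_x -= 1
--         if c == 'B':
--             starting_y += 1
--         if c == 'T':
--             starting_y -= 1
--         final_res.append((starting_x, starting_y))
--         counter += 1
--     return tuple(final_res)
-- ===== SOURCE B (Python) =====
-- def _path(s, x, y):
--     """Return (points, end) of the path for movement string s starting at (x, y).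
--
--     Divide and conquer: solve each half independently, gluing the right half
--     onto the left half's endpoint (translation-invariance of the path).
--     """
--     if len(s) == 0:
--         return [(x, y)], (x, y)
--     if len(s) == 1:
--         e = (x + (s == 'R') - (s == 'L'), y + (s == 'B') - (s == 'T'))
--         return [(x, y), e], e
--     m = len(s) // 2
--     left, (mx, my) = _path(s[:m], x, y)
--     right, end = _path(s[m:], mx, my)
--     return left + right[1:], end
--
-- def stock_final_output(final_output, starting_x, starting_y):
--     points, _ = _path(final_output, starting_x, starting_y)
--     return tuple(points)
-- ===== Notes on version B (the rewrite author's own statement) =====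
-- stated objective: alternative
-- what changed: Replaces the left-to-right running-position loop with a divide-and-conquer construction: the path of each half of the string is built recursively and the right half's path is glued onto the left half's endpoint.
import Mathlib
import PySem

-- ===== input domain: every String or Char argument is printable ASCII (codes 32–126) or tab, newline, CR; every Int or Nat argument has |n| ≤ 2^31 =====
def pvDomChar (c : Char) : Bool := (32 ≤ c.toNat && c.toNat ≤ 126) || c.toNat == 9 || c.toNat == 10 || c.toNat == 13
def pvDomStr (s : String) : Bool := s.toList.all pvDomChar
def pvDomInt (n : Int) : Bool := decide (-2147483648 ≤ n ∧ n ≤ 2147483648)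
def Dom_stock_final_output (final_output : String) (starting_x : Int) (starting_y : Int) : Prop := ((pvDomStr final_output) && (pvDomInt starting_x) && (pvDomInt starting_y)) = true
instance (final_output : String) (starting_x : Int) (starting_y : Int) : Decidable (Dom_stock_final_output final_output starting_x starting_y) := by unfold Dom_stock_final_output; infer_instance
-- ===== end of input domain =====

-- B builds the path by divide and conquer on the string (gluing each half's path at the midpoint) instead of A's left-to-right running-position loop.

-- ===== PORT A =====
-- loop body of A: the four independent ifs mutating the running position, then append
def pvStepA (st : Int × Int × List (Int × Int)) (c : Char) : Int × Int × List (Int × Int) :=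
  let x := if c = 'R' then st.1 + 1 else st.1
  let x := if c = 'L' then x - 1 else x
  let y := if c = 'B' then st.2.1 + 1 else st.2.1
  let y := if c = 'T' then y - 1 else y
  (x, y, st.2.2 ++ [(x, y)])

def stock_final_output (final_output : String) (starting_x : Int) (starting_y : Int) : List (Int × Int) :=
  (final_output.toList.foldl pvStepA (starting_x, starting_y, [(starting_x, starting_y)])).2.2

-- ===== PORT B =====
-- Source B's _path: divide and conquer, returning (points, end position)
def pvPathB (l : List Char) (x y : Int) : List (Int × Int) × (Int × Int) :=
  match l with
  | [] => ([(x, y)], (x, y))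
  | [c] =>
      let e : Int × Int := (x + (if c = 'R' then 1 else 0) - (if c = 'L' then 1 else 0),
                           y + (if c = 'B' then 1 else 0) - (if c = 'T' then 1 else 0))
      ([(x, y), e], e)
  | a :: b :: rest =>
      let m := (a :: b :: rest).length / 2
      let L := pvPathB ((a :: b :: rest).take m) x y
      let R := pvPathB ((a :: b :: rest).drop m) L.2.1 L.2.2
      (L.1 ++ R.1.drop 1, R.2)
termination_by l.length
decreasing_by
  · simp; omega
  · simp; omega

def stock_final_output_alt (final_output : String) (starting_x : Int) (starting_y : Int) : List (Int × Int) :=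
  (pvPathB final_output.toList starting_x starting_y).1

-- ===== PRECONDITION & SPEC =====
def Spec_stock_final_output (final_output : String) (starting_x : Int) (starting_y : Int) (out : List (Int × Int)) : Prop := out = stock_final_output_alt final_output starting_x starting_y
instance (final_output : String) (starting_x : Int) (starting_y : Int) (out : List (Int × Int)) : Decidable (Spec_stock_final_output final_output starting_x starting_y out) := by unfold Spec_stock_final_output; infer_instance

-- ===== CLAIM (what is proved, stated in full; the proofs are below) =====
def Claim_equal_stock_final_output : Prop := ∀ (final_output : String) (starting_x : Int) (starting_y : Int), Dom_stock_final_output final_output starting_x starting_y → Spec_stock_final_output final_output starting_x starting_y (stock_final_output final_output starting_x starting_y)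

-- ===== LEMMAS AND PROOFS =====
-- canonical cons-recursive path and endpoint, the common yardstick for both ports
def pvDX (c : Char) : Int := (if c = 'R' then 1 else 0) - (if c = 'L' then 1 else 0)
def pvDY (c : Char) : Int := (if c = 'B' then 1 else 0) - (if c = 'T' then 1 else 0)

def pvP : List Char → Int → Int → List (Int × Int)
  | [], x, y => [(x, y)]
  | c :: t, x, y => (x, y) :: pvP t (x + pvDX c) (y + pvDY c)

def pvEnd : List Char → Int → Int → Int × Int
  | [], x, y => (x, y)
  | c :: t, x, y => pvEnd t (x + pvDX c) (y + pvDY c)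

lemma pvP_head (t : List Char) (x y : Int) : pvP t x y = (x, y) :: (pvP t x y).drop 1 := by
  cases t <;> rfl

lemma pvStepA_eq (x y : Int) (acc : List (Int × Int)) (c : Char) :
    pvStepA (x, y, acc) c = (x + pvDX c, y + pvDY c, acc ++ [(x + pvDX c, y + pvDY c)]) := by
  by_cases hR : c = 'R' <;> by_cases hL : c = 'L' <;>
    by_cases hB : c = 'B' <;> by_cases hT : c = 'T' <;>
    simp_all [pvStepA, pvDX, pvDY] <;> omega

lemma pvFoldA (l : List Char) (x y : Int) (acc : List (Int × Int)) :
    l.foldl pvStepA (x, y, acc)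
      = ((pvEnd l x y).1, (pvEnd l x y).2, acc ++ (pvP l x y).drop 1) := by
  induction l generalizing x y acc with
  | nil => simp [pvP, pvEnd]
  | cons c t ih =>
    rw [List.foldl_cons, pvStepA_eq, ih]
    simp only [pvP, pvEnd, List.drop_succ_cons, List.drop_zero]
    rw [pvP_head t (x + pvDX c) (y + pvDY c)]
    simp

lemma pvEnd_append (s t : List Char) (x y : Int) :
    pvEnd (s ++ t) x y = pvEnd t (pvEnd s x y).1 (pvEnd s x y).2 := by
  induction s generalizing x y with
  | nil => rfl
  | cons c s ih => simp [pvEnd, ih]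

lemma pvP_append (s t : List Char) (x y : Int) :
    pvP (s ++ t) x y = pvP s x y ++ (pvP t (pvEnd s x y).1 (pvEnd s x y).2).drop 1 := by
  induction s generalizing x y with
  | nil =>
    simp only [List.nil_append, pvP, pvEnd]
    exact pvP_head t x y
  | cons c s ih => simp [pvP, pvEnd, ih]

lemma pvPathB_eq_aux : ∀ (n : Nat) (l : List Char), l.length ≤ n → ∀ (x y : Int),
    pvPathB l x y = (pvP l x y, pvEnd l x y) := by
  intro n
  induction n with
  | zero =>
    intro l hl x y
    have : l = [] := List.length_eq_zero_iff.mp (Nat.le_zero.mp hl)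
    subst this
    simp [pvPathB, pvP, pvEnd]
  | succ n ih =>
    intro l hl x y
    match l with
    | [] => simp [pvPathB, pvP, pvEnd]
    | [c] =>
      by_cases hR : c = 'R' <;> by_cases hL : c = 'L' <;>
        by_cases hB : c = 'B' <;> by_cases hT : c = 'T' <;>
        simp_all [pvPathB, pvP, pvEnd, pvDX, pvDY, Prod.mk.injEq, List.cons.injEq] <;> omega
    | a :: b :: rest =>
      simp only [pvPathB]
      have hlen : (a :: b :: rest).length = rest.length + 2 := by simp
      have h1 : ((a :: b :: rest).take ((a :: b :: rest).length / 2)).length ≤ n := by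
        simp only [List.length_take, hlen] at *
        omega
      have h2 : ((a :: b :: rest).drop ((a :: b :: rest).length / 2)).length ≤ n := by
        simp only [List.length_drop, hlen] at *
        omega
      rw [ih _ h1, ih _ h2]
      have hsplit : (a :: b :: rest).take ((a :: b :: rest).length / 2)
          ++ (a :: b :: rest).drop ((a :: b :: rest).length / 2) = a :: b :: rest :=
        List.take_append_drop _ _
      conv_rhs => rw [← hsplit]
      rw [pvP_append, pvEnd_append]

lemma pvPathB_eq (l : List Char) (x y : Int) :
    pvPathB l x y = (pvP l x y, pvEnd l x y) :=
  pvPathB_eq_aux l.length l (Nat.le_refl _) x y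

-- ===== VERDICT (by name: the statement is the Claim_ definition above) =====
theorem stock_final_output_spec : Claim_equal_stock_final_output := by
  intro s sx sy _
  unfold Spec_stock_final_output stock_final_output stock_final_output_alt
  rw [pvFoldA, pvPathB_eq]
  simp only
  exact (pvP_head s.toList sx sy).symm
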